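-- pv_equiv track=rewrite | github.com/mortdu1234/algoEtProgProjet | Zlogs.py | zip_path
-- ===== SOURCE A (Python) =====
-- def zip_path(path:list[tuple[int, int]])-> list[tuple[int, int, int]]:
--     current_x, current_y = path[0]
--     counter = 0
--     res = []
--     for x, y in path:
--         if x==current_x and y==current_y:
--             counter += 1
--         else:
--             res.append((current_x, current_y, counter))
--             counter = 1
--             current_x = x
--             current_y = y
--
--     res.append((current_x, current_y, counter))
--     return res
-- ===== SOURCE B (Python) =====
-- def zip_path(path: list[tuple[int, int]]) -> list[tuple[int, int, int]]:
--     res = []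
--     i, n = 0, len(path)
--     while i < n:
--         j = i + 1
--         while j < n and path[j] == path[i]:
--             j += 1
--         x, y = path[i]
--         res.append((x, y, j - i))
--         i = j
--     return res
-- ===== Notes on version B (the rewrite author's own statement) =====
-- stated objective: alternative
-- what changed: B replaces A's single pass with current/counter state by a two-pointer run scanner: an inner scan finds the end of each run of equal coordinates and emits (x, y, run length) directly, keeping no carried state between runs.
import Mathlib
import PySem

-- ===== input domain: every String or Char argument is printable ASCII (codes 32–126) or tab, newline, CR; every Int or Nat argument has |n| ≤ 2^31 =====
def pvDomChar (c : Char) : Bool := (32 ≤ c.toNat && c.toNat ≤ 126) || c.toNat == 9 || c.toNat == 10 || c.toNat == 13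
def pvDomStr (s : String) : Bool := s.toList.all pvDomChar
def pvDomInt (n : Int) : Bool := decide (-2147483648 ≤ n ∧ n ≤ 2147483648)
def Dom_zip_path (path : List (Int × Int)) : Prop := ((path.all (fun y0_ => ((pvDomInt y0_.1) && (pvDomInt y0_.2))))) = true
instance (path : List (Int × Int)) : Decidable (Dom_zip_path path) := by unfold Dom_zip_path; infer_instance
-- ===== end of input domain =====

-- B is a two-pointer run scanner (no carried current/counter state); A and B agree on every
-- non-empty path; on [] A raises IndexError (excluded by Pre_) while B returns [].

-- ===== PORT A =====
-- A's for-loop over path, carrying (current_x, current_y, counter, res).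
def zipLoopA (cx cy cnt : Int) (res : List (Int × Int × Int)) :
    List (Int × Int) → List (Int × Int × Int)
  | [] => res ++ [(cx, cy, cnt)]
  | (x, y) :: rest =>
      if x == cx && y == cy then
        zipLoopA cx cy (cnt + 1) res rest
      else
        zipLoopA x y 1 (res ++ [(cx, cy, cnt)]) rest

def zip_path (path : List (Int × Int)) : List (Int × Int × Int) :=
  match path with
  | [] => []  -- unreachable: path[0] raises IndexError, excluded by Pre_zip_path
  | (x0, y0) :: _ => zipLoopA x0 y0 0 [] path

-- ===== PORT B =====
-- B's outer while loop: each step the inner scan (takeWhile) finds the end of the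
-- current run; emit (x, y, run length) and continue on the remaining suffix.
def zip_path_alt (path : List (Int × Int)) : List (Int × Int × Int) :=
  match path with
  | [] => []
  | p :: rest =>
      (p.1, p.2, (1 + (rest.takeWhile (· == p)).length : Int)) ::
        zip_path_alt (rest.dropWhile (· == p))
termination_by path.length
decreasing_by
  simp only [List.length_cons]
  exact Nat.lt_succ_of_le (List.length_dropWhile_le _ _)

-- ===== PRECONDITION & SPEC =====
-- A evaluates path[0]: the empty list raises IndexError, hence excluded.
def Pre_zip_path (path : List (Int × Int)) : Prop := path ≠ []
instance (path : List (Int × Int)) : Decidable (Pre_zip_path path) := by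
  unfold Pre_zip_path; infer_instance
def pvWitness_zip_path : (List (Int × Int)) := [(1, 2), (1, 2), (3, 4)]

def Spec_zip_path (path : List (Int × Int)) (out : List (Int × Int × Int)) : Prop := out = zip_path_alt path
instance (path : List (Int × Int)) (out : List (Int × Int × Int)) : Decidable (Spec_zip_path path out) := by unfold Spec_zip_path; infer_instance

-- ===== CLAIM (what is proved, stated in full; the proofs are below) =====
def Claim_equal_zip_path : Prop := ∀ (path : List (Int × Int)), Dom_zip_path path → Pre_zip_path path → Spec_zip_path path (zip_path path)

-- ===== LEMMAS AND PROOFS =====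

-- A's loop, run on any suffix, appends the pending run (extended by the matching
-- prefix of the suffix) and then exactly B's runs of the rest.
lemma zipLoopA_eq (path : List (Int × Int)) : ∀ (cx cy cnt : Int) (res : List (Int × Int × Int)),
    zipLoopA cx cy cnt res path =
      res ++ (cx, cy, cnt + (path.takeWhile (· == (cx, cy))).length) ::
        zip_path_alt (path.dropWhile (· == (cx, cy))) := by
  induction path with
  | nil =>
      intro cx cy cnt res
      simp [zipLoopA, zip_path_alt]
  | cons p rest ih =>
      intro cx cy cnt res
      obtain ⟨x, y⟩ := p
      by_cases h : x = cx ∧ y = cy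
      · obtain ⟨hx, hy⟩ := h
        have hstep : zipLoopA cx cy cnt res ((x, y) :: rest)
            = zipLoopA cx cy (cnt + 1) res rest := by
          simp [zipLoopA, hx, hy]
        have heq : ((x, y) == (cx, cy)) = true := by simp [hx, hy]
        rw [hstep, ih]
        simp [List.takeWhile, List.dropWhile, heq]
        ring_nf
      · have hne : ((x, y) == (cx, cy)) = false := by
          rw [beq_eq_false_iff_ne]
          intro hc; cases hc; exact h ⟨rfl, rfl⟩
        have hstep : zipLoopA cx cy cnt res ((x, y) :: rest)
            = zipLoopA x y 1 (res ++ [(cx, cy, cnt)]) rest := by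
          have : (x == cx && y == cy) = false := by
            rcases not_and_or.mp h with h' | h' <;> simp [h']
          simp [zipLoopA, this]
        rw [hstep, ih]
        rw [show zip_path_alt (((x, y) :: rest).dropWhile (· == (cx, cy)))
              = zip_path_alt ((x, y) :: rest) by simp [List.dropWhile, hne]]
        rw [show zip_path_alt ((x, y) :: rest)
              = (x, y, (1 + (rest.takeWhile (· == (x, y))).length : Int)) ::
                  zip_path_alt (rest.dropWhile (· == (x, y))) by
              conv_lhs => rw [zip_path_alt]]
        simp [List.takeWhile, hne]

-- ===== VERDICT (by name: the statement is the Claim_ definition above) =====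
theorem zip_path_spec : Claim_equal_zip_path := by
  intro path _ hpre
  unfold Spec_zip_path
  match path with
  | [] => exact absurd rfl hpre
  | (x0, y0) :: rest =>
      show zipLoopA x0 y0 0 [] ((x0, y0) :: rest) = _
      rw [zipLoopA_eq]
      simp [List.takeWhile, List.dropWhile, zip_path_alt]
      try omega
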